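-- pv_equiv track=rewrite | github.com/zeolsem/script-languages-assignments | src/text_processing/e_longest_sentence_with_different_first_letters.py | longest_unique_adjacent_sentence
-- ===== SOURCE A (Python) =====
-- def longest_unique_adjacent_sentence(input_stream):
--     """
--     Finds the longest sentence with different first letters in each word in a text stream
--
--     :param input_stream: must be in processed format
--     :return: Longest sentence meeting the condition above in the stream
--     """
--     longest_valid_sentence = ""
--
--     for sentence in input_stream:
--         used_letters = ""
--         is_valid = True
--         for word in sentence.split():
--             if word[0].lower() in used_letters:
--                 is_valid = False
--                 break
--             else:
--                 used_letters += word[0].lower()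
--
--         if is_valid:
--             if len(sentence) > len(longest_valid_sentence):
--                 longest_valid_sentence = sentence
--
--     return longest_valid_sentence
-- ===== SOURCE B (Python) =====
-- def longest_unique_adjacent_sentence(input_stream):
--     """Sort the stream by length (descending, stable sort keeps earliest on ties) and
--     return the first sentence whose sorted first-letter list has no equal adjacent pair."""
--     for sentence in sorted(input_stream, key=len, reverse=True):
--         letters = sorted(w[0].lower() for w in sentence.split())
--         if all(a != b for a, b in zip(letters, letters[1:])):
--             return sentence
--     return ""
-- ===== Notes on version B (the rewrite author's own statement) =====
-- stated objective: alternative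
-- what changed: B stages the work differently: it stable-sorts the whole stream by length descending and returns the first sentence that passes, and it tests validity by sorting the word-initial letters and checking no equal adjacent pair, instead of A's single pass with a running best and an incremental used-letters membership loop.
import Mathlib
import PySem

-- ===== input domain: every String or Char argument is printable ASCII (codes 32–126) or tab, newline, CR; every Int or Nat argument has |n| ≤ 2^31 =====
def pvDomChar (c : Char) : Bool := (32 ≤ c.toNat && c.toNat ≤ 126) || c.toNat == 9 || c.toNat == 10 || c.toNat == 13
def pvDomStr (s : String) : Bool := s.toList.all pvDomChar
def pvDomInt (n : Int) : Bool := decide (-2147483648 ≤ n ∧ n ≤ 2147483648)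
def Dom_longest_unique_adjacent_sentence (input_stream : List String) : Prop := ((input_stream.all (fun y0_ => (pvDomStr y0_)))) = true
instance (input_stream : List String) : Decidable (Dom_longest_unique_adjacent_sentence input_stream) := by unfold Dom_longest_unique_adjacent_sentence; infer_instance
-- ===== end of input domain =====

-- B stages the work differently (objective: alternative, same cost class): it stable-sorts the
-- stream by length descending and returns the first sentence whose sorted first-letter list has
-- no equal adjacent pair, instead of A's single pass with a running best and an incremental
-- used-letters membership loop.

-- ===== PORT A =====
-- first letter of a word, lowered: word[0].lower(); words come from split() so are nonempty
-- (on the empty word Python would raise IndexError; unreachable here, headD is exact on split() output)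
def pvFirstLower (w : String) : Char := PySem.Chars.lowerChar (w.toList.headD ' ')

-- A's inner loop: used_letters accumulated one char at a time, early break on membership
-- ('c in used_letters' with a one-char c is exactly char membership)
def pvAInner : List String → List Char → Bool
  | [], _ => true
  | w :: ws, used =>
    if used.contains (pvFirstLower w) then false
    else pvAInner ws (used ++ [pvFirstLower w])

def longest_unique_adjacent_sentence (input_stream : List String) : String :=
  input_stream.foldl
    (fun longest sentence =>
      if pvAInner (PySem.Str.split₀ sentence) [] then
        if PySem.Str.len sentence > PySem.Str.len longest then sentence else longest
      else longest)
    ""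

-- ===== PORT B =====
-- letters = sorted(w[0].lower() for w in sentence.split());
-- all(a != b for a, b in zip(letters, letters[1:]))
def pvNoAdjDup (letters : List Char) : Bool :=
  (letters.zip (PySem.List.slice letters (some 1) none)).all (fun p => p.1 != p.2)

def pvIsValid (sentence : String) : Bool :=
  pvNoAdjDup (PySem.List.sorted ((PySem.Str.split₀ sentence).map pvFirstLower) (fun c => c) false)

-- the for-loop with an early return: first sentence of the sorted stream that passes, else ""
def pvFindValid : List String → String
  | [] => ""
  | s :: t => if pvIsValid s then s else pvFindValid t

def longest_unique_adjacent_sentence_alt (input_stream : List String) : String :=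
  pvFindValid (PySem.List.sorted input_stream PySem.Str.len true)

-- ===== PRECONDITION & SPEC =====
def Spec_longest_unique_adjacent_sentence (input_stream : List String) (out : String) : Prop := out = longest_unique_adjacent_sentence_alt input_stream
instance (input_stream : List String) (out : String) : Decidable (Spec_longest_unique_adjacent_sentence input_stream out) := by unfold Spec_longest_unique_adjacent_sentence; infer_instance

-- ===== CLAIM (what is proved, stated in full; the proofs are below) =====
def Claim_equal_longest_unique_adjacent_sentence : Prop := ∀ (input_stream : List String), Dom_longest_unique_adjacent_sentence input_stream → Spec_longest_unique_adjacent_sentence input_stream (longest_unique_adjacent_sentence input_stream)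

-- ===== LEMMAS AND PROOFS =====

-- A's inner loop decides: the new letters are pairwise distinct and avoid `used`
theorem pvAInner_eq (ws : List String) (used : List Char) :
    pvAInner ws used = true ↔
      ((ws.map pvFirstLower).Nodup ∧ ∀ c ∈ ws.map pvFirstLower, c ∉ used) := by
  induction ws generalizing used with
  | nil => simp [pvAInner]
  | cons w ws ih =>
    simp only [pvAInner, List.map_cons, List.nodup_cons]
    by_cases h : pvFirstLower w ∈ used
    · simp only [List.contains_eq_mem, h, decide_true, if_true, Bool.false_eq_true,
        false_iff, not_and]
      intro _ hall
      exact absurd h (hall (pvFirstLower w) (List.mem_cons_self))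
    · simp only [List.contains_eq_mem, h, decide_false, Bool.false_eq_true, if_false, ih]
      constructor
      · rintro ⟨hn, hall⟩
        refine ⟨⟨fun hm => absurd (List.mem_append.mpr (Or.inr (List.mem_singleton.mpr rfl)))
            (hall _ hm), hn⟩, ?_⟩
        intro c hc
        rcases List.mem_cons.mp hc with rfl | hc'
        · exact h
        · intro hcu
          exact hall c hc' (List.mem_append.mpr (Or.inl hcu))
      · rintro ⟨⟨hw, hn⟩, hall⟩
        refine ⟨hn, fun c hc hcu => ?_⟩
        rcases List.mem_append.mp hcu with hcu | hcu
        · exact hall c (List.mem_cons_of_mem _ hc) hcu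
        · exact hw ((List.mem_singleton.mp hcu) ▸ hc)

-- the zip-with-tail 'no equal adjacent pair' test is the adjacent chain of ≠
theorem pvZipAll_eq_isChain (L : List Char) :
    ((L.zip L.tail).all (fun p => p.1 != p.2)) = true ↔ L.IsChain (· ≠ ·) := by
  induction L with
  | nil => simp
  | cons x t ih =>
    cases t with
    | nil => simp
    | cons y u =>
      simp only [List.tail_cons, List.zip_cons_cons, List.all_cons, List.isChain_cons_cons,
        Bool.and_eq_true, bne_iff_ne]
      exact and_congr Iff.rfl (by simpa using ih)

-- on a (ascending-)sorted list, 'no equal adjacent pair' decides Nodup of the original list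
theorem pvSortedNe_iff_nodup (L : List Char) :
    (PySem.List.sorted L (fun c => c) false).IsChain (· ≠ ·) ↔ L.Nodup := by
  have hperm := PySem.List.sorted_perm L (fun c => c) false
  constructor
  · intro hne
    have hle : (PySem.List.sorted L (fun c => c) false).IsChain (· ≤ ·) :=
      (PySem.List.sorted_pairwise L (fun c => c)).isChain
    have hlt : (PySem.List.sorted L (fun c => c) false).IsChain (· < ·) := by
      rw [List.isChain_iff_getElem] at hle hne ⊢
      intro i hi
      exact lt_of_le_of_ne (hle i hi) (hne i hi)
    exact hperm.nodup_iff.mp (hlt.pairwise.imp ne_of_lt)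
  · intro hnd
    exact (hperm.nodup_iff.mpr hnd).isChain

-- B's validity check agrees with A's inner loop started from no used letters
theorem pvIsValid_eq (s : String) :
    pvIsValid s = pvAInner (PySem.Str.split₀ s) [] := by
  have hA := pvAInner_eq (PySem.Str.split₀ s) []
  simp only [List.not_mem_nil, not_false_iff, implies_true, and_true] at hA
  have hB : pvIsValid s = true ↔ ((PySem.Str.split₀ s).map pvFirstLower).Nodup := by
    unfold pvIsValid pvNoAdjDup
    rw [PySem.List.slice_from_one, pvZipAll_eq_isChain]
    exact pvSortedNe_iff_nodup _
  cases hb : pvAInner (PySem.Str.split₀ s) [] with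
  | false =>
    rw [hb] at hA
    cases hv : pvIsValid s with
    | false => rfl
    | true => exact absurd (hA.mpr (hB.mp hv)) (by simp)
  | true => exact hB.mpr (hA.mp hb)

-- filtering first = testing validity inside A's fold
theorem pvFold_filter (xs : List String) (b : String) :
    xs.foldl
      (fun longest sentence =>
        if pvAInner (PySem.Str.split₀ sentence) [] then
          if PySem.Str.len sentence > PySem.Str.len longest then sentence else longest
        else longest) b
    = (xs.filter pvIsValid).foldl
        (fun b s => if PySem.Str.len s > PySem.Str.len b then s else b) b := by
  induction xs generalizing b with
  | nil => rfl
  | cons x t ih =>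
    rw [List.foldl_cons, List.filter_cons, pvIsValid_eq]
    by_cases h : pvAInner (PySem.Str.split₀ x) [] = true
    · rw [if_pos h, if_pos h, List.foldl_cons, ih]
    · rw [if_neg h, if_neg h, ih]

-- unfolding one step of insertBy
theorem pvInsertBy_cons {α : Type} (before : α → α → Bool) (x y : α) (ys : List α) :
    PySem.List.insertBy before x (y :: ys)
      = if before x y = true then x :: y :: ys else y :: PySem.List.insertBy before x ys := by
  simp [PySem.List.insertBy]

-- insertBy puts x in front when it beats every element
theorem pvInsertBy_of_all_before {α : Type} (before : α → α → Bool) (x : α) (l : List α)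
    (h : ∀ y ∈ l, before x y = true) :
    PySem.List.insertBy before x l = x :: l := by
  cases l with
  | nil => rfl
  | cons y ys => simp [PySem.List.insertBy, h y List.mem_cons_self]

-- filter commutes with a descending stable insertion into a descending-sorted list
theorem pvFilter_insertBy {α κ : Type} [LinearOrder κ] (key : α → κ) (p : α → Bool)
    (x : α) (l : List α) (hs : l.Pairwise (fun a b => key b ≤ key a)) :
    (PySem.List.insertBy (fun a b => decide (key b < key a)) x l).filter p
      = if p x then PySem.List.insertBy (fun a b => decide (key b < key a)) x (l.filter p)
        else l.filter p := by
  induction l with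
  | nil => cases hpx : p x <;> simp [PySem.List.insertBy, hpx]
  | cons y ys ih =>
    rcases List.pairwise_cons.mp hs with ⟨hy, hys⟩
    by_cases hb : key y < key x
    · rw [show PySem.List.insertBy (fun a b => decide (key b < key a)) x (y :: ys)
          = x :: y :: ys from by simp [PySem.List.insertBy, hb]]
      cases hpx : p x with
      | true =>
        rw [if_pos rfl]
        rw [List.filter_cons_of_pos hpx]
        rw [pvInsertBy_of_all_before]
        intro z hz
        have hz' : z ∈ y :: ys := List.mem_of_mem_filter hz
        rcases List.mem_cons.mp hz' with rfl | hz''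
        · simpa using hb
        · simpa using lt_of_le_of_lt (hy z hz'') hb
      | false => rw [if_neg (by simp), List.filter_cons_of_neg (by simp [hpx])]
    · rw [show PySem.List.insertBy (fun a b => decide (key b < key a)) x (y :: ys)
          = y :: PySem.List.insertBy (fun a b => decide (key b < key a)) x ys from by
            simp [PySem.List.insertBy, hb]]
      cases hpy : p y with
      | true =>
        rw [List.filter_cons_of_pos hpy, ih hys, List.filter_cons_of_pos hpy]
        cases hpx : p x with
        | true =>
          rw [if_pos rfl, if_pos rfl]
          rw [show PySem.List.insertBy (fun a b => decide (key b < key a)) x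
              (y :: ys.filter p)
            = y :: PySem.List.insertBy (fun a b => decide (key b < key a)) x (ys.filter p)
            from by simp [PySem.List.insertBy, hb]]
        | false => rw [if_neg (by simp), if_neg (by simp)]
      | false =>
        rw [List.filter_cons_of_neg (by simp [hpy]), ih hys,
          List.filter_cons_of_neg (by simp [hpy])]

-- hence filter commutes with the whole descending stable sort
theorem pvFilter_sorted (p : String → Bool) (xs : List String) :
    (PySem.List.sorted xs PySem.Str.len true).filter p
      = PySem.List.sorted (xs.filter p) PySem.Str.len true := by
  induction xs using List.reverseRecOn with
  | nil => rfl
  | append_singleton xs x ih =>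
    rw [PySem.List.sorted_rev_eq_foldl_insertBy, List.foldl_append, List.foldl_cons,
      List.foldl_nil, ← PySem.List.sorted_rev_eq_foldl_insertBy,
      pvFilter_insertBy PySem.Str.len p x _ (PySem.List.sorted_pairwise_rev xs PySem.Str.len),
      ih, List.filter_append]
    cases hpx : p x with
    | true =>
      rw [if_pos rfl]
      rw [show (List.filter p [x]) = [x] from by simp [hpx]]
      rw [PySem.List.sorted_rev_eq_foldl_insertBy (xs.filter p ++ [x]),
        List.foldl_append, List.foldl_cons, List.foldl_nil,
        ← PySem.List.sorted_rev_eq_foldl_insertBy]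
    | false =>
      rw [if_neg (by simp)]
      rw [show (List.filter p [x]) = [] from by simp [hpx], List.append_nil]

-- the early-return scan is: head of the filtered list, default ""
theorem pvFindValid_eq_headD (l : List String) :
    pvFindValid l = (l.filter pvIsValid).headD "" := by
  induction l with
  | nil => rfl
  | cons s t ih =>
    rw [List.filter_cons]
    cases h : pvIsValid s with
    | true => simp [pvFindValid, h]
    | false => simp [pvFindValid, h, ih]

-- a string of length ≤ 0 is ""
theorem pvLen_le_zero (x : String) (h : ¬ PySem.Str.len "" < PySem.Str.len x) : x = "" := by
  rw [PySem.Str.len_eq, PySem.Str.len_eq] at h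
  have hx : x.toList = [] := by
    rw [← List.length_eq_zero_iff]
    simpa using h
  exact String.toList_eq_nil_iff.mp hx

-- the head of the descending stable sort is A's running strict max from ""
theorem pvHead_sorted_eq_fold (V : List String) :
    (PySem.List.sorted V PySem.Str.len true).headD ""
      = V.foldl (fun b s => if PySem.Str.len s > PySem.Str.len b then s else b) "" := by
  induction V using List.reverseRecOn with
  | nil => rfl
  | append_singleton V x ih =>
    rw [PySem.List.sorted_rev_eq_foldl_insertBy, List.foldl_append, List.foldl_cons,
      List.foldl_nil, ← PySem.List.sorted_rev_eq_foldl_insertBy,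
      List.foldl_append, List.foldl_cons, List.foldl_nil, ← ih]
    cases hV : PySem.List.sorted V PySem.Str.len true with
    | nil =>
      simp only [PySem.List.insertBy, List.headD_cons, List.headD_nil]
      by_cases h : PySem.Str.len "" < PySem.Str.len x
      · rw [if_pos h]
      · rw [if_neg h, pvLen_le_zero x h]
    | cons y ys =>
      rw [pvInsertBy_cons]
      by_cases h : PySem.Str.len y < PySem.Str.len x
      · rw [if_pos (by simpa using h)]
        simp only [List.headD_cons]
        rw [if_pos h]
      · rw [if_neg (by simpa using h)]
        simp only [List.headD_cons]
        rw [if_neg h]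

-- ===== VERDICT (by name: the statement is the Claim_ definition above) =====
theorem longest_unique_adjacent_sentence_spec : Claim_equal_longest_unique_adjacent_sentence := by
  intro input_stream _
  unfold Spec_longest_unique_adjacent_sentence
  unfold longest_unique_adjacent_sentence longest_unique_adjacent_sentence_alt
  rw [pvFold_filter, pvFindValid_eq_headD, pvFilter_sorted, pvHead_sorted_eq_fold]
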